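-- pv_equiv track=rewrite | github.com/HenryIdesis/ner_llm | ner_llm.py | extrair_CH_intra_OP
-- ===== SOURCE A (Python) =====
-- import unicodedata
-- from typing import Optional, List, Dict, Any
-- import unicodedata
--
-- def normalizar(texto: str) -> str:
--     """Remove acentos, converte para minúsculas, normaliza quebras de linha."""
--     texto = texto.replace("\r", "\n")
--     texto = unicodedata.normalize("NFKD", texto)
--     texto = "".join(ch for ch in texto if not unicodedata.combining(ch))
--     return texto.lower()
--
-- def extrair_CH_intra_OP(texto: str, contexto_cirurgia: Optional[str] = None):
--     """Quimioterapia intra-operatória: 0 = não, 1 = sim. Verifica se realmente foi durante a cirurgia."""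
--     texto_base = contexto_cirurgia if contexto_cirurgia else texto
--     t = normalizar(texto_base)
--     # Procura padrões específicos de quimioterapia intra-operatória
--     if "quimio" in t and "intra" in t and "operat" in t:
--         # Verifica se não é negação
--         idx = t.find("intra")
--         contexto = t[max(0, idx-50):min(len(t), idx+50)]
--         if "nao" not in contexto:
--             return 1
--     if contexto_cirurgia:
--         return extrair_CH_intra_OP(texto, contexto_cirurgia=None)
--     return 0
-- ===== SOURCE B (Python) =====
-- import unicodedata
-- from typing import Optional
--
--
-- def _normalizar(texto: str) -> str:
--     texto = texto.replace("\r", "\n")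
--     texto = unicodedata.normalize("NFKD", texto)
--     texto = "".join(ch for ch in texto if not unicodedata.combining(ch))
--     return texto.lower()
--
--
-- def _matches(text: str) -> bool:
--     """True iff the normalized text mentions intra-operative chemo without 'nao' nearby."""
--     t = _normalizar(text)
--     if "quimio" not in t or "intra" not in t or "operat" not in t:
--         return False
--     idx = t.find("intra")
--     return "nao" not in t[max(0, idx - 50):idx + 50]
--
--
-- def extrair_CH_intra_OP(texto: str, contexto_cirurgia: Optional[str] = None):
--     """Quimioterapia intra-operatória: 0 = não, 1 = sim."""
--     candidatos = [contexto_cirurgia, texto] if contexto_cirurgia else [texto]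
--     for c in candidatos:
--         if _matches(c):
--             return 1
--     return 0
-- ===== Notes on version B (the rewrite author's own statement) =====
-- stated objective: simpler
-- what changed: Replaces A's single-level self-recursion (re-entering the whole function with contexto=None) by a guard helper predicate _matches plus a first-match scan over the explicit ordered candidate list [contexto, texto] / [texto].
import Mathlib
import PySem

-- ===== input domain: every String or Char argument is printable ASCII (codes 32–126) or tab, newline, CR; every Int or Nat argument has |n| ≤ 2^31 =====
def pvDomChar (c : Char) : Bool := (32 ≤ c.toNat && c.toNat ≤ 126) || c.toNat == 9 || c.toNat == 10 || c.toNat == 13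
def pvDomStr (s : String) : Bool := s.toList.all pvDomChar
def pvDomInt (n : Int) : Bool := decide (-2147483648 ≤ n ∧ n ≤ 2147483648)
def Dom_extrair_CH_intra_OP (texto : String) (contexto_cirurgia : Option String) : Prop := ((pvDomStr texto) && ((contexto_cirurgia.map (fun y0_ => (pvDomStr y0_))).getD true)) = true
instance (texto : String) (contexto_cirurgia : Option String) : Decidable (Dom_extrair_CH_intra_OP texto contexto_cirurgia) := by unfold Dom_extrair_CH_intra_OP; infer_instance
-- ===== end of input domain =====

-- B replaces A's single-level self-recursion by a match-predicate helper and a first-match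
-- scan over the explicit ordered candidate list (simpler decomposition, same cost).


-- ===== PORT A =====
-- normalizar: on the printable-ASCII domain NFKD normalization and combining-mark removal
-- are the identity, so the port is exactly replace("\r","\n") followed by lower().
def pyNormalizar (texto : String) : String :=
  PySem.Str.lower (PySem.Str.replace texto "\r" "\n")

-- Literal transliteration of A; the recursion has depth exactly one (the recursive call is
-- made with contexto_cirurgia=None), so that call is unrolled in place.
def extrair_CH_intra_OP (texto : String) (contexto_cirurgia : Option String) : Int :=
  let texto_base := match contexto_cirurgia with
    | some c => if c ≠ "" then c else texto
    | none => texto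
  let t := pyNormalizar texto_base
  let ret1 :=
    if PySem.Str.isIn "quimio" t && PySem.Str.isIn "intra" t && PySem.Str.isIn "operat" t then
      let idx := PySem.Str.find t "intra"
      let contexto := PySem.Str.slice t (some (max 0 (idx - 50))) (some (min (PySem.Str.len t) (idx + 50)))
      !PySem.Str.isIn "nao" contexto
    else false
  if ret1 then 1
  else match contexto_cirurgia with
    | some c =>
      if c ≠ "" then
        -- extrair_CH_intra_OP texto None, unrolled:
        let t2 := pyNormalizar texto
        let ret2 :=
          if PySem.Str.isIn "quimio" t2 && PySem.Str.isIn "intra" t2 && PySem.Str.isIn "operat" t2 then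
            let idx := PySem.Str.find t2 "intra"
            let contexto := PySem.Str.slice t2 (some (max 0 (idx - 50))) (some (min (PySem.Str.len t2) (idx + 50)))
            !PySem.Str.isIn "nao" contexto
          else false
        if ret2 then 1 else 0
      else 0
    | none => 0

-- ===== PORT B =====
def pyMatches (text : String) : Bool :=
  let t := pyNormalizar text
  if !PySem.Str.isIn "quimio" t || !PySem.Str.isIn "intra" t || !PySem.Str.isIn "operat" t then
    false
  else
    let idx := PySem.Str.find t "intra"
    !PySem.Str.isIn "nao" (PySem.Str.slice t (some (max 0 (idx - 50))) (some (idx + 50)))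

def extrair_CH_intra_OP_alt (texto : String) (contexto_cirurgia : Option String) : Int :=
  let candidatos : List String := match contexto_cirurgia with
    | some c => if c ≠ "" then [c, texto] else [texto]
    | none => [texto]
  match candidatos.find? (fun c => pyMatches c) with
  | some _ => 1
  | none => 0

-- ===== PRECONDITION & SPEC =====
def Spec_extrair_CH_intra_OP (texto : String) (contexto_cirurgia : Option String) (out : Int) : Prop := out = extrair_CH_intra_OP_alt texto contexto_cirurgia
instance (texto : String) (contexto_cirurgia : Option String) (out : Int) : Decidable (Spec_extrair_CH_intra_OP texto contexto_cirurgia out) := by unfold Spec_extrair_CH_intra_OP; infer_instance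

-- ===== CLAIM (what is proved, stated in full; the proofs are below) =====
def Claim_equal_extrair_CH_intra_OP : Prop := ∀ (texto : String) (contexto_cirurgia : Option String), Dom_extrair_CH_intra_OP texto contexto_cirurgia → Spec_extrair_CH_intra_OP texto contexto_cirurgia (extrair_CH_intra_OP texto contexto_cirurgia)

-- ===== LEMMAS AND PROOFS =====

-- The slice's upper bound may drop the explicit min with the length: slicing clamps.
lemma slice_min_len (xs : List Char) (a b : Int) (hb : 0 ≤ b) :
    PySem.List.slice xs (some (max 0 a)) (some (min (xs.length : Int) b)) =
    PySem.List.slice xs (some (max 0 a)) (some b) := by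
  have ha : (0:Int) ≤ max 0 a := le_max_left _ _
  by_cases h : b ≤ (xs.length : Int)
  · rw [min_eq_right h]
  · rw [min_eq_left (by omega)]
    rw [PySem.List.slice_toNat xs ha (by omega), PySem.List.slice_toNat xs ha hb]
    have hlen : (xs.drop (max 0 a).toNat).length ≤ (xs.length : Int).toNat - (max 0 a).toNat := by
      simp [List.length_drop]
    rw [List.take_of_length_le hlen,
        List.take_of_length_le (le_trans hlen (by omega))]

-- "return 1 iff P and then Q" vs "return False unless P, then Q": the same guard, flipped.
lemma bool_if_flip (a b c x y : Bool) (h : a = true → b = true → c = true → x = y) :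
    (if a && b && c then x else false) = (if !a || !b || !c then false else y) := by
  cases a <;> cases b <;> cases c <;> simp_all

-- A's inline "return 1?" check equals B's helper predicate.
lemma ret1_eq_matches (text : String) :
    (let t := pyNormalizar text
     if PySem.Str.isIn "quimio" t && PySem.Str.isIn "intra" t && PySem.Str.isIn "operat" t then
       let idx := PySem.Str.find t "intra"
       let contexto := PySem.Str.slice t (some (max 0 (idx - 50))) (some (min (PySem.Str.len t) (idx + 50)))
       !PySem.Str.isIn "nao" contexto
     else false) = pyMatches text := by
  unfold pyMatches
  refine bool_if_flip _ _ _ _ _ (fun _ h2 _ => ?_)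
  have hfind : (0:Int) ≤ PySem.Str.find (pyNormalizar text) "intra" := by
    rw [PySem.Str.find_nonneg_iff]
    exact (PySem.Str.isIn_iff_infix _ _).mp h2
  simp only [PySem.Str.isIn_eq, PySem.Str.toList_slice, PySem.Chars.slice_eq_listSlice,
    PySem.Str.len_eq]
  rw [slice_min_len (pyNormalizar text).toList (PySem.Str.find (pyNormalizar text) "intra" - 50)
      (PySem.Str.find (pyNormalizar text) "intra" + 50) (by omega)]

-- ===== VERDICT (by name: the statement is the Claim_ definition above) =====
theorem extrair_CH_intra_OP_spec : Claim_equal_extrair_CH_intra_OP := by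
  intro texto contexto _
  show extrair_CH_intra_OP texto contexto = extrair_CH_intra_OP_alt texto contexto
  unfold extrair_CH_intra_OP extrair_CH_intra_OP_alt
  cases contexto with
  | none =>
    simp only
    rw [ret1_eq_matches texto]
    cases h : pyMatches texto <;> simp [List.find?, h]
  | some c =>
    by_cases hc : c = ""
    · subst hc
      simp only [ne_eq, not_true_eq_false, if_false]
      rw [ret1_eq_matches texto]
      cases h : pyMatches texto <;> simp [List.find?, h]
    · simp only [ne_eq, hc, not_false_eq_true, if_true]
      rw [ret1_eq_matches c, ret1_eq_matches texto]
      cases h1 : pyMatches c <;> cases h2 : pyMatches texto <;> simp [List.find?, h1, h2]
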